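-- pv_equiv track=rewrite | github.com/kellaviietee/Python-projects | EX/ex05_hobbies/hobbies.py | create_hobby_number_dict
-- ===== SOURCE A (Python) =====
-- def create_hobby_number_dict(unique_hobbies: list, all_hobbies: list) -> dict:
--     """
--     Create a dictionary of how many people practices  a hobby.
--     :param unique_hobbies: List of unique hobbies
--     :param all_hobbies: list of list of peoples hobbies
--     :return:
--     """
--     hobby_name_dict = {}
--     for hobby in unique_hobbies:
--         number_of_practitioners = 0
--         for hobby_list in all_hobbies:
--             if hobby in hobby_list:
--                 number_of_practitioners += 1
--         hobby_name_dict[hobby] = number_of_practitioners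
--     return hobby_name_dict
-- ===== SOURCE B (Python) =====
-- def create_hobby_number_dict(unique_hobbies: list, all_hobbies: list) -> dict:
--     """Count people practicing each unique hobby: one pass over all people
--     building a tally, then assemble over unique_hobbies with default 0."""
--     counts = {}
--     for person_list in all_hobbies:
--         for hobby in set(person_list):
--             counts[hobby] = counts.get(hobby, 0) + 1
--     result = {}
--     for hobby in unique_hobbies:
--         result[hobby] = counts.get(hobby, 0)
--     return result
-- ===== Notes on version B (the rewrite author's own statement) =====
-- stated objective: faster
-- what changed: Replaces the nested rescan of all people for every hobby with a single pass that builds a per-hobby tally dict (deduplicating each person's list with set()), then assembles the result over unique_hobbies with default 0.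
import Mathlib
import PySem

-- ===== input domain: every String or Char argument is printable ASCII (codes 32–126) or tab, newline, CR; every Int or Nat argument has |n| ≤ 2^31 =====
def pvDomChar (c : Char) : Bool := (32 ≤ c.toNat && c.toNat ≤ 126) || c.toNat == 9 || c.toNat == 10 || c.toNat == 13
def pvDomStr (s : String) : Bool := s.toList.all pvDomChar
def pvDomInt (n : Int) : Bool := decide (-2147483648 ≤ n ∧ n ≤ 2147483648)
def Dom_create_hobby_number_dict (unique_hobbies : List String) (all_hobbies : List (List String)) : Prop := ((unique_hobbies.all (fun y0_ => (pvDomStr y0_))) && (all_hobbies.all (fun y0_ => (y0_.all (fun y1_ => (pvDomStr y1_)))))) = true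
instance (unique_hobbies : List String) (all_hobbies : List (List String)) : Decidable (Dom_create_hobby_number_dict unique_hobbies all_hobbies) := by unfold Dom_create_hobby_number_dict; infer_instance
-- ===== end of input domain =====

-- ===== PORT A =====
-- B replaces A's per-hobby rescan of all people with a one-pass tally dict; proved equal on Dom.
def create_hobby_number_dict (unique_hobbies : List String) (all_hobbies : List (List String)) : List (String × Int) :=
  (unique_hobbies.foldl (fun hobby_name_dict hobby =>
      let number_of_practitioners : Int :=
        all_hobbies.foldl (fun n hobby_list =>
          if hobby_list.contains hobby then n + 1 else n) 0
      hobby_name_dict.insert hobby number_of_practitioners)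
    PySem.Dict.empty).items

-- ===== PORT B =====
def create_hobby_number_dict_alt (unique_hobbies : List String) (all_hobbies : List (List String)) : List (String × Int) :=
  let counts : PySem.Dict String Int :=
    all_hobbies.foldl (fun counts person_list =>
        (PySem.Set.ofList person_list).foldl (fun counts hobby =>
          counts.modify hobby 0 (· + 1)) counts)
      PySem.Dict.empty
  (unique_hobbies.foldl (fun result hobby =>
      result.insert hobby (counts.getD hobby 0))
    PySem.Dict.empty).items

-- ===== PRECONDITION & SPEC =====
def Spec_create_hobby_number_dict (unique_hobbies : List String) (all_hobbies : List (List String)) (out : List (String × Int)) : Prop := out = create_hobby_number_dict_alt unique_hobbies all_hobbies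
instance (unique_hobbies : List String) (all_hobbies : List (List String)) (out : List (String × Int)) : Decidable (Spec_create_hobby_number_dict unique_hobbies all_hobbies out) := by unfold Spec_create_hobby_number_dict; infer_instance

-- ===== CLAIM (what is proved, stated in full; the proofs are below) =====
def Claim_equal_create_hobby_number_dict : Prop := ∀ (unique_hobbies : List String) (all_hobbies : List (List String)), Dom_create_hobby_number_dict unique_hobbies all_hobbies → Spec_create_hobby_number_dict unique_hobbies all_hobbies (create_hobby_number_dict unique_hobbies all_hobbies)

-- ===== LEMMAS AND PROOFS =====

-- ===== VERDICT (by name: the statement is the Claim_ definition above) =====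
-- count of a value in a deduplicated list is its membership indicator
lemma count_ofList_eq (p : List String) (h : String) :
    (PySem.Set.ofList p).count h = (if p.contains h then 1 else 0) := by
  by_cases hm : h ∈ p
  · rw [if_pos (by simpa using hm)]
    exact List.count_eq_one_of_mem (PySem.Set.nodup_ofList p)
      (by simpa [PySem.Set.mem_ofList] using hm)
  · rw [if_neg (by simpa using hm)]
    exact List.count_eq_zero.mpr (by simpa [PySem.Set.mem_ofList] using hm)

-- the tally dict built by B holds, for each hobby, the number of person lists containing it
lemma counts_getD (all_hobbies : List (List String)) (h : String)
    (d : PySem.Dict String Int) :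
    (all_hobbies.foldl (fun counts person_list =>
        (PySem.Set.ofList person_list).foldl (fun counts hobby =>
          counts.modify hobby 0 (· + 1)) counts) d).getD h 0
      = d.getD h 0 + ((all_hobbies.filter (fun l => l.contains h)).length : Int) := by
  induction all_hobbies generalizing d with
  | nil => simp
  | cons p rest ih =>
      rw [List.foldl_cons, ih, PySem.Dict.getD_foldl_modify_add_one, count_ofList_eq]
      simp only [List.filter_cons]
      split_ifs <;> simp <;> omega

-- A's inner loop counts the same person lists
lemma inner_count (all_hobbies : List (List String)) (h : String) (c : Int) :
    all_hobbies.foldl (fun n hobby_list =>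
        if hobby_list.contains h then n + 1 else n) c
      = c + ((all_hobbies.filter (fun l => l.contains h)).length : Int) := by
  induction all_hobbies generalizing c with
  | nil => simp
  | cons p rest ih =>
      rw [List.foldl_cons, List.filter_cons]
      by_cases hp : p.contains h = true
      · rw [if_pos hp, if_pos hp, ih, List.length_cons]
        push_cast; ring
      · rw [if_neg hp, if_neg hp, ih]

-- ===== VERDICT (by name: the statement is the Claim_ definition above) =====
theorem create_hobby_number_dict_spec : Claim_equal_create_hobby_number_dict := by
  intro u a _
  unfold Spec_create_hobby_number_dict create_hobby_number_dict create_hobby_number_dict_alt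
  congr 1
  apply PySem.List.foldl_congr_mem
  intro acc hobby _
  rw [inner_count, counts_getD]
  simp
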